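-- pv_equiv track=rewrite | github.com/Samlant/QuickDraw | app/QuickDraw/models/submission/handler.py | _split_addresses
-- ===== SOURCE A (Python) =====
-- def _split_addresses(input_list: list[str]) -> list[str]:
--     list_of_strings: list[str] = []
--     for item in input_list:
--         x = item.split(";")
--         for y in x:
--             if y.strip() != "":
--                 list_of_strings.append(y)
--     return list_of_strings
-- ===== SOURCE B (Python) =====
-- def _split_addresses(input_list: list[str]) -> list[str]:
--     out: list[str] = []
--     for item in input_list:
--         buf: list[str] = []
--         for ch in item + ";":
--             if ch == ";":
--                 piece = "".join(buf)
--                 if piece.strip() != "":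
--                     out.append(piece)
--                 buf = []
--             else:
--                 buf.append(ch)
--     return out
-- ===== Notes on version B (the rewrite author's own statement) =====
-- stated objective: alternative
-- what changed: Replaces per-item library split()+filter by an explicit character-level state machine that scans each item (with a sentinel ';' appended) accumulating a buffer and flushing it as an output piece when it contains a non-blank character.
import Mathlib
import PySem

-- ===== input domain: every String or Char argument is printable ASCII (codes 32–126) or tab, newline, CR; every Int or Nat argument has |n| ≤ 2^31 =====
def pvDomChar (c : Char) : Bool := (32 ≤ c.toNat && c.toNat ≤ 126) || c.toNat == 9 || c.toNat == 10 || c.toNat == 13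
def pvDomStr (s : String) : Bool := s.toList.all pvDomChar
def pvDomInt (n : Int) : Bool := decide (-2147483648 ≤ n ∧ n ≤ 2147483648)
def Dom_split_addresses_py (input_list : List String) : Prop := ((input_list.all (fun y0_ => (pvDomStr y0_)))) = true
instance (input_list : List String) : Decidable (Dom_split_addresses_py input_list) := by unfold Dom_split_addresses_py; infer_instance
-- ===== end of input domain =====

-- B replaces A's per-item split()+filter loop by an explicit character-level state machine with a buffer flushed on ';' (alternative decomposition; same cost).


-- ===== PORT A =====
-- item.split(";") with the literal nonempty separator ";" is PySem.Chars.splitOn on code points (exact)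
def split_addresses_py (input_list : List String) : List String :=
  input_list.foldl
    (fun list_of_strings item =>
      ((PySem.Chars.splitOn item.toList ";".toList).map String.ofList).foldl
        (fun acc y => if PySem.Str.strip y ≠ "" then acc ++ [y] else acc)
        list_of_strings)
    []

-- ===== PORT B =====
-- flush of the buffer: ''.join(buf); append it iff piece.strip() != ""
def flushB (out : List String) (buf : List Char) : List String :=
  let piece := String.ofList buf
  if PySem.Str.strip piece ≠ "" then out ++ [piece] else out

-- one character step of B's state machine
def stepB (st : List String × List Char) (ch : Char) : List String × List Char :=
  if ch = ';' then (flushB st.1 st.2, []) else (st.1, st.2 ++ [ch])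

def split_addresses_py_alt (input_list : List String) : List String :=
  input_list.foldl
    (fun out item => ((item.toList ++ [';']).foldl stepB (out, [])).1)
    []

-- ===== PRECONDITION & SPEC =====
def Spec_split_addresses_py (input_list : List String) (out : List String) : Prop := out = split_addresses_py_alt input_list
instance (input_list : List String) (out : List String) : Decidable (Spec_split_addresses_py input_list out) := by unfold Spec_split_addresses_py; infer_instance

-- ===== CLAIM (what is proved, stated in full; the proofs are below) =====
def Claim_equal_split_addresses_py : Prop := ∀ (input_list : List String), Dom_split_addresses_py input_list → Spec_split_addresses_py input_list (split_addresses_py input_list)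

-- ===== LEMMAS AND PROOFS =====

-- reference recursion for splitting a char list on ';'
def myspl : List Char → List (List Char)
  | [] => [[]]
  | c :: rest => if c = ';' then [] :: myspl rest else
      match myspl rest with
      | [] => [[c]]
      | y :: ys => (c :: y) :: ys

theorem myspl_ne_nil (l : List Char) : myspl l ≠ [] := by
  cases l with
  | nil => simp [myspl]
  | cons c rest =>
    simp only [myspl]
    split
    · simp
    · split <;> simp

theorem splitOn_go_eq : ∀ (fuel : Nat) (l cur : List Char) (acc : List (List Char)),
    l.length < fuel →
    PySem.Chars.splitOn.go [';'] fuel l cur acc =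
      acc.reverse ++ (cur.reverse ++ (myspl l).headI) :: (myspl l).tail := by
  intro fuel
  induction fuel with
  | zero => intro l cur acc h; omega
  | succ f ih =>
    intro l cur acc h
    cases l with
    | nil => simp [PySem.Chars.splitOn.go, myspl]
    | cons c rest =>
      by_cases hc : c = ';'
      · subst hc
        have : List.isPrefixOf [';'] (';' :: rest) = true := by
          simp [List.isPrefixOf]
        rw [PySem.Chars.splitOn.go]
        simp only [this, if_pos]
        have hr : rest.length < f := by simpa using Nat.lt_of_succ_lt_succ h
        rw [show List.drop (List.length [';']) (';' :: rest) = rest by simp]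
        rw [ih rest [] (List.reverse cur :: acc) hr]
        have hne := myspl_ne_nil rest
        cases hm : myspl rest with
        | nil => exact absurd hm hne
        | cons y ys => simp [myspl, hm]
      · have : List.isPrefixOf [';'] (c :: rest) = false := by
          simp [List.isPrefixOf]
          intro h'; exact absurd h'.symm hc
        rw [PySem.Chars.splitOn.go]
        simp only [this, Bool.false_eq_true, if_neg, not_false_iff]
        have hr : rest.length < f := by simpa using Nat.lt_of_succ_lt_succ h
        rw [ih rest (c :: cur) acc hr]
        have hne := myspl_ne_nil rest
        cases hm : myspl rest with
        | nil => exact absurd hm hne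
        | cons y ys => simp [myspl, hm, hc]

theorem splitOn_eq_myspl (l : List Char) : PySem.Chars.splitOn l [';'] = myspl l := by
  unfold PySem.Chars.splitOn
  rw [splitOn_go_eq (l.length + 1) l [] [] (Nat.lt_succ_self _)]
  have hne := myspl_ne_nil l
  cases hm : myspl l with
  | nil => exact absurd hm hne
  | cons y ys => simp

-- appending ';' splits off one final empty piece
theorem myspl_append_semi (l : List Char) : myspl (l ++ [';']) = myspl l ++ [[]] := by
  induction l with
  | nil => simp [myspl]
  | cons c rest ih =>
    by_cases hc : c = ';'
    · subst hc; simp [myspl, ih]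
    · simp only [List.cons_append, myspl, hc, if_neg, not_false_iff, ih]
      cases hm : myspl rest with
      | nil => exact absurd hm (myspl_ne_nil rest)
      | cons y ys => simp

-- characterisation of B's scan: the flushed prefix and the live buffer
theorem scan_eq : ∀ (l : List Char) (out : List String) (buf : List Char),
    l.foldl stepB (out, buf) =
      ( (((buf ++ (myspl l).headI) :: (myspl l).tail).dropLast).foldl flushB out,
        ((buf ++ (myspl l).headI) :: (myspl l).tail).getLastD [] ) := by
  intro l
  induction l with
  | nil => intro out buf; simp [myspl]
  | cons c rest ih =>
    intro out buf
    by_cases hc : c = ';'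
    · subst hc
      simp only [List.foldl_cons, stepB, if_true]
      rw [ih (flushB out buf) []]
      cases hm : myspl rest with
      | nil => exact absurd hm (myspl_ne_nil rest)
      | cons y ys => simp [myspl, hm]
    · simp only [List.foldl_cons, stepB, hc, if_neg, not_false_iff]
      rw [ih out (buf ++ [c])]
      cases hm : myspl rest with
      | nil => exact absurd hm (myspl_ne_nil rest)
      | cons y ys => simp [myspl, hm, hc]

-- B's per-item scan equals a flush-fold over the pieces of the item
theorem scan_item (item : List Char) (out : List String) :
    ((item ++ [';']).foldl stepB (out, [])).1 = (myspl item).foldl flushB out := by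
  rw [scan_eq]
  rw [myspl_append_semi]
  cases hm : myspl item with
  | nil => exact absurd hm (myspl_ne_nil item)
  | cons y ys =>
    simp only [List.headI, List.nil_append, List.cons_append, List.tail_cons]
    rw [show y :: (ys ++ [[]]) = (y :: ys) ++ [([] : List Char)] by simp,
        List.dropLast_concat]

-- A's per-item inner loop is the same flush-fold over those pieces
theorem inner_A_eq (item : List Char) (out : List String) :
    ((PySem.Chars.splitOn item [';']).map String.ofList).foldl
        (fun acc y => if PySem.Str.strip y ≠ "" then acc ++ [y] else acc) out =
      (myspl item).foldl flushB out := by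
  rw [splitOn_eq_myspl, List.foldl_map]
  rfl

-- ===== VERDICT (by name: the statement is the Claim_ definition above) =====
theorem split_addresses_py_spec : Claim_equal_split_addresses_py := by
  intro input_list _
  unfold Spec_split_addresses_py split_addresses_py split_addresses_py_alt
  apply PySem.List.foldl_congr_mem
  intro out item _
  rw [show (";" : String).toList = [';'] from rfl, inner_A_eq, scan_item]
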